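-- pv_equiv track=rewrite | github.com/eliottcassidy2000/math | 04-computation/eigenspace_identity_proof_local.py | enumerate_diff_seqs
-- ===== SOURCE A (Python) =====
-- def enumerate_diff_seqs(S, n, max_deg):
--     S_sorted = sorted(S)
--     seqs = {0: [()]}
--     partial_sums = {(): frozenset([0])}
--     partial_last = {(): 0}
--
--     for m in range(1, max_deg + 1):
--         prev = seqs[m - 1]
--         new = []
--         new_ps = {}
--         new_last = {}
--         for seq in prev:
--             ps = partial_sums[seq]
--             last = partial_last[seq]
--             for s in S_sorted:
--                 new_last_sum = (last + s) % n
--                 if new_last_sum not in ps: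
--                     new_seq = seq + (s,)
--                     new.append(new_seq)
--                     new_ps[new_seq] = ps | frozenset([new_last_sum])
--                     new_last[new_seq] = new_last_sum
--         seqs[m] = new
--         partial_sums.update(new_ps)
--         partial_last.update(new_last)
--
--     return seqs
-- ===== SOURCE B (Python) =====
-- def enumerate_diff_seqs(S, n, max_deg):
--     S_sorted = sorted(S)
--     result = {m: [] for m in range(max_deg + 1)}
--     result[0] = [()]
--
--     def extend(seq, used, last, depth):
--         if depth >= max_deg:
--             return
--         for s in S_sorted:
--             t = (last + s) % n
--             if t not in used:
--                 child = seq + (s,)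
--                 result[depth + 1].append(child)
--                 extend(child, used | {t}, t, depth + 1)
--
--     extend((), frozenset([0]), 0, 0)
--     return result
-- ===== Notes on version B (the rewrite author's own statement) =====
-- stated objective: alternative
-- what changed: Replaces A's level-by-level BFS, which memoises every sequence's prefix-sum set and last sum in two growing dictionaries, by a recursive pre-order DFS that carries each branch's prefix-sum set and last sum on the call stack and appends each new sequence into a per-depth bucket; pre-order visiting yields the identical per-level order.
import Mathlib
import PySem

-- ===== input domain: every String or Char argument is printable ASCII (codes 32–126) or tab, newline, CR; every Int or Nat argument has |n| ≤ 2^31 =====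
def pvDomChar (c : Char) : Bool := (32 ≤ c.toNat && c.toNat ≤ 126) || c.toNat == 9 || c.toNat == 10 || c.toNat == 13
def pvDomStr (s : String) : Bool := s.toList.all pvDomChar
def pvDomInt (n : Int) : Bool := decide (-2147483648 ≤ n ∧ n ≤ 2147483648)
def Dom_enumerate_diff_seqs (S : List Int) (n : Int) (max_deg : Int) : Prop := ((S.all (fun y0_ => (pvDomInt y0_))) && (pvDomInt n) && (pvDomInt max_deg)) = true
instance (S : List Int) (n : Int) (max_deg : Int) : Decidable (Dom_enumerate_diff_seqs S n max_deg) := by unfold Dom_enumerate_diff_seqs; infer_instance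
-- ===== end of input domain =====

-- B replaces A's level-by-level BFS (with its two memoisation dicts) by a recursive pre-order
-- DFS that carries each branch's prefix-sum set on the call stack (objective: alternative).

-- ===== PORT A =====
-- Python dict subscripts seqs[m-1], partial_sums[seq], partial_last[seq] are ported as getD:
-- the keys are always present (level m-1 was stored the previous iteration, and both partial_*
-- dicts hold an entry for every sequence of every completed level), so no KeyError is reachable
-- and getD computes exactly the Python lookup.

def enumerate_diff_seqs (S : List Int) (n : Int) (max_deg : Int) : List (Int × List (List Int)) :=
  let S_sorted := PySem.List.sorted S (fun x => x) false
  let seqs : PySem.Dict Int (List (List Int)) := PySem.Dict.empty.insert 0 [[]]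
  let partial_sums : PySem.Dict (List Int) (PySem.Set Int) :=
    PySem.Dict.empty.insert [] (PySem.Set.ofList [0])
  let partial_last : PySem.Dict (List Int) Int := PySem.Dict.empty.insert [] 0
  let st := (PySem.List.pyRange 1 (max_deg + 1)).foldl (fun st m =>
    let prev := st.1.getD (m - 1) []
    let inner := prev.foldl (fun acc seq =>
      let ps := st.2.1.getD seq []
      let last := st.2.2.getD seq 0
      S_sorted.foldl (fun acc s =>
        let new_last_sum := PySem.Int.mod (last + s) n
        if PySem.Set.contains ps new_last_sum then acc
        else
          let new_seq := seq ++ [s]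
          (acc.1 ++ [new_seq],
           acc.2.1.insert new_seq (PySem.Set.union ps (PySem.Set.ofList [new_last_sum])),
           acc.2.2.insert new_seq new_last_sum)) acc)
      (([] : List (List Int)),
       (PySem.Dict.empty : PySem.Dict (List Int) (PySem.Set Int)),
       (PySem.Dict.empty : PySem.Dict (List Int) Int))
    (st.1.insert m inner.1, st.2.1.update inner.2.1.items, st.2.2.update inner.2.2.items))
    (seqs, partial_sums, partial_last)
  st.1.items

-- ===== PORT B =====
-- pvExtend transcribes B's recursive helper `extend`; `fuel = (max_deg - depth).toNat` is the
-- structural termination measure and encodes exactly B's `if depth >= max_deg: return` guard.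
def pvExtend (S_sorted : List Int) (n : Int) (seq : List Int) (used : PySem.Set Int)
    (last depth : Int) (fuel : Nat) (result : PySem.Dict Int (List (List Int))) :
    PySem.Dict Int (List (List Int)) :=
  match fuel with
  | 0 => result
  | fuel' + 1 =>
    S_sorted.foldl (fun result s =>
      let t := PySem.Int.mod (last + s) n
      if PySem.Set.contains used t then result
      else
        let child := seq ++ [s]
        pvExtend S_sorted n child (PySem.Set.union used (PySem.Set.ofList [t])) t (depth + 1) fuel'
          (result.modify (depth + 1) [] (· ++ [child]))) result

def enumerate_diff_seqs_alt (S : List Int) (n : Int) (max_deg : Int) : List (Int × List (List Int)) :=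
  let S_sorted := PySem.List.sorted S (fun x => x) false
  let result : PySem.Dict Int (List (List Int)) :=
    (PySem.List.pyRange 0 (max_deg + 1)).foldl (fun d m => d.insert m []) PySem.Dict.empty
  let result := result.insert 0 [[]]
  (pvExtend S_sorted n [] (PySem.Set.ofList [0]) 0 0 max_deg.toNat result).items


-- ===== PRECONDITION & SPEC =====
-- Pre_ excludes exactly the inputs on which A raises ZeroDivisionError: n = 0 while the loop
-- body actually computes (last + s) % n, i.e. max_deg ≥ 1 and S nonempty (B raises there too).
def Pre_enumerate_diff_seqs (S : List Int) (n : Int) (max_deg : Int) : Prop :=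
  ¬ (n = 0 ∧ 1 ≤ max_deg ∧ S ≠ [])
instance (S : List Int) (n : Int) (max_deg : Int) : Decidable (Pre_enumerate_diff_seqs S n max_deg) := by
  unfold Pre_enumerate_diff_seqs; infer_instance

def pvWitness_enumerate_diff_seqs : List Int × Int × Int := ([1, 2], 5, 3)

def Spec_enumerate_diff_seqs (S : List Int) (n : Int) (max_deg : Int) (out : List (Int × List (List Int))) : Prop := out = enumerate_diff_seqs_alt S n max_deg
instance (S : List Int) (n : Int) (max_deg : Int) (out : List (Int × List (List Int))) : Decidable (Spec_enumerate_diff_seqs S n max_deg out) := by unfold Spec_enumerate_diff_seqs; infer_instance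

-- ===== CLAIM (what is proved, stated in full; the proofs are below) =====
def Claim_equal_enumerate_diff_seqs : Prop := ∀ (S : List Int) (n : Int) (max_deg : Int), Dom_enumerate_diff_seqs S n max_deg → Pre_enumerate_diff_seqs S n max_deg → Spec_enumerate_diff_seqs S n max_deg (enumerate_diff_seqs S n max_deg)

-- ===== LEMMAS AND PROOFS =====

abbrev pvSt : Type := List Int × PySem.Set Int × Int

def pvKids (ss : List Int) (n : Int) (q : pvSt) : List pvSt :=
  ss.flatMap (fun s =>
    let t := PySem.Int.mod (q.2.2 + s) n
    if PySem.Set.contains q.2.1 t then []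
    else [(q.1 ++ [s], PySem.Set.union q.2.1 (PySem.Set.ofList [t]), t)])

def pvDesc (ss : List Int) (n : Int) : Nat → pvSt → List pvSt
  | 0, q => [q]
  | j+1, q => (pvKids ss n q).flatMap (pvDesc ss n j)

def pvSt0 : pvSt := ([], PySem.Set.ofList [0], 0)

def pvLev (ss : List Int) (n : Int) (j : Nat) : List pvSt := pvDesc ss n j pvSt0
def pvLevSeqs (ss : List Int) (n : Int) (j : Nat) : List (List Int) := (pvLev ss n j).map (·.1)

lemma pvDesc_succ_outer (ss : List Int) (n : Int) :
    ∀ (j : Nat) (q : pvSt), pvDesc ss n (j+1) q = (pvDesc ss n j q).flatMap (pvKids ss n) := by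
  intro j
  induction j with
  | zero => intro q; simp [pvDesc]
  | succ j ih =>
      intro q
      show (pvKids ss n q).flatMap (pvDesc ss n (j+1)) = _
      rw [List.flatMap_congr (fun c _ => ih c), ← List.flatMap_assoc]
      rfl


lemma pvGetD_foldl_insert {κ ν : Type} [BEq κ] [LawfulBEq κ] [DecidableEq κ] (f : κ → ν) :
    ∀ (pairs : List (κ × ν)) (d : PySem.Dict κ ν) (x : κ) (dflt : ν),
      (∀ p ∈ pairs, p.2 = f p.1) →
      (pairs.foldl (fun d p => d.insert p.1 p.2) d).getD x dflt
        = if x ∈ pairs.map (·.1) then f x else d.getD x dflt := by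
  intro pairs
  induction pairs with
  | nil => simp
  | cons p rest ih =>
      intro d x dflt h
      simp only [List.foldl_cons]
      rw [ih _ _ _ (fun q hq => h q (by simp [hq]))]
      by_cases hx : x ∈ rest.map (·.1)
      · simp [hx]
      · simp only [hx, if_false]
        rw [PySem.Dict.getD_insert]
        by_cases hxp : x = p.1
        · simp [hxp, (h p (by simp)).symm]
        · simp [hxp, hx]

lemma pvItems_foldl_insert {κ ν : Type} [BEq κ] [LawfulBEq κ] (f : κ → ν) :
    ∀ (pairs : List (κ × ν)) (d : PySem.Dict κ ν),
      (∀ p ∈ pairs, p.2 = f p.1) → (∀ p ∈ d.items, p.2 = f p.1) →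
      ∀ p ∈ (pairs.foldl (fun d p => d.insert p.1 p.2) d).items, p.2 = f p.1 := by
  intro pairs
  induction pairs with
  | nil => intro d _ hd; simpa using hd
  | cons p rest ih =>
      intro d h hd
      refine ih _ (fun q hq => h q (by simp [hq])) ?_
      intro q hq
      rcases (PySem.Dict.mem_items_insert _ _ _ _).1 hq with hq1 | hq2
      · subst hq1; exact h p (by simp)
      · exact hd q hq2.1

def pvStateOf (n : Int) (seq : List Int) : PySem.Set Int × Int :=
  seq.foldl (fun p s =>
    let t := PySem.Int.mod (p.2 + s) n
    (PySem.Set.union p.1 (PySem.Set.ofList [t]), t)) (PySem.Set.ofList [0], 0)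

lemma pvKids_shape (ss : List Int) (n : Int) (q : pvSt) (hq : q.2 = pvStateOf n q.1) :
    ∀ c ∈ pvKids ss n q, c.2 = pvStateOf n c.1 := by
  intro c hc
  simp only [pvKids, List.mem_flatMap] at hc
  obtain ⟨s, _, hc⟩ := hc
  by_cases h : PySem.Set.contains q.2.1 (PySem.Int.mod (q.2.2 + s) n) = true
  · rw [if_pos h] at hc; simp at hc
  · rw [if_neg h] at hc
    rw [List.mem_singleton] at hc
    subst hc
    simp only [pvStateOf, List.foldl_append, List.foldl_cons, List.foldl_nil]
    rw [← pvStateOf]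
    rw [← hq]

lemma pvLev_shape (ss : List Int) (n : Int) :
    ∀ (j : Nat) (q : pvSt), q ∈ pvLev ss n j → q.2 = pvStateOf n q.1 := by
  have base : pvSt0.2 = pvStateOf 0 pvSt0.1 := rfl
  intro j
  induction j with
  | zero => intro q hq; simp only [pvLev, pvDesc, List.mem_singleton] at hq; subst hq; rfl
  | succ j ih =>
      intro q hq
      rw [pvLev, pvDesc_succ_outer] at hq
      simp only [List.mem_flatMap] at hq
      obtain ⟨c, hc, hq⟩ := hq
      exact pvKids_shape ss n c (ih c hc) q hq

lemma pvARow (ss : List Int) (n : Int) (q : pvSt) :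
    ∀ (acc : List (List Int) × PySem.Dict (List Int) (PySem.Set Int) × PySem.Dict (List Int) Int),
    ss.foldl (fun acc s =>
        if PySem.Set.contains q.2.1 (PySem.Int.mod (q.2.2 + s) n) then acc
        else
          (acc.1 ++ [q.1 ++ [s]],
           acc.2.1.insert (q.1 ++ [s])
             (PySem.Set.union q.2.1 (PySem.Set.ofList [PySem.Int.mod (q.2.2 + s) n])),
           acc.2.2.insert (q.1 ++ [s]) (PySem.Int.mod (q.2.2 + s) n))) acc
      = (acc.1 ++ (pvKids ss n q).map (·.1),
         (pvKids ss n q).foldl (fun d c => d.insert c.1 c.2.1) acc.2.1,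
         (pvKids ss n q).foldl (fun d c => d.insert c.1 c.2.2) acc.2.2) := by
  induction ss with
  | nil => intro acc; simp [pvKids]
  | cons s ss ih =>
      intro acc
      rw [List.foldl_cons]
      by_cases h : PySem.Set.contains q.2.1 (PySem.Int.mod (q.2.2 + s) n) = true
      · simp only [h, if_true]
        rw [ih acc]
        have hk : pvKids (s :: ss) n q = pvKids ss n q := by
          simp only [pvKids, List.flatMap_cons]
          rw [if_pos h]
          simp
        rw [hk]
      · simp only [h, if_neg, Bool.false_eq_true, not_false_eq_true]
        rw [ih]
        have hk : pvKids (s :: ss) n q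
            = (q.1 ++ [s], PySem.Set.union q.2.1 (PySem.Set.ofList [PySem.Int.mod (q.2.2 + s) n]),
               PySem.Int.mod (q.2.2 + s) n) :: pvKids ss n q := by
          simp only [pvKids, List.flatMap_cons]
          rw [if_neg h]
          simp
        rw [hk]
        simp [List.foldl_cons]

lemma pvAInner (ss : List Int) (n : Int) (L : List pvSt)
    (psD : PySem.Dict (List Int) (PySem.Set Int)) (lastD : PySem.Dict (List Int) Int)
    (h : ∀ q ∈ L, psD.getD q.1 [] = q.2.1 ∧ lastD.getD q.1 0 = q.2.2) :
    ∀ acc : List (List Int) × PySem.Dict (List Int) (PySem.Set Int) × PySem.Dict (List Int) Int,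
    (L.map (·.1)).foldl (fun acc seq =>
        ss.foldl (fun acc s =>
          if PySem.Set.contains (psD.getD seq []) (PySem.Int.mod (lastD.getD seq 0 + s) n) then acc
          else
            (acc.1 ++ [seq ++ [s]],
             acc.2.1.insert (seq ++ [s])
               (PySem.Set.union (psD.getD seq [])
                 (PySem.Set.ofList [PySem.Int.mod (lastD.getD seq 0 + s) n])),
             acc.2.2.insert (seq ++ [s]) (PySem.Int.mod (lastD.getD seq 0 + s) n))) acc) acc
      = (acc.1 ++ (L.flatMap (pvKids ss n)).map (·.1),
         (L.flatMap (pvKids ss n)).foldl (fun d c => d.insert c.1 c.2.1) acc.2.1,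
         (L.flatMap (pvKids ss n)).foldl (fun d c => d.insert c.1 c.2.2) acc.2.2) := by
  induction L with
  | nil => intro acc; simp
  | cons q L ih =>
      intro acc
      simp only [List.map_cons, List.foldl_cons, List.flatMap_cons]
      rw [(h q (by simp)).1, (h q (by simp)).2, pvARow ss n q acc,
          ih (fun r hr => h r (by simp [hr]))]
      simp [List.foldl_append, List.append_assoc]

abbrev pvATriple : Type :=
  PySem.Dict Int (List (List Int)) × PySem.Dict (List Int) (PySem.Set Int) × PySem.Dict (List Int) Int

def pvAInit : pvATriple :=
  (PySem.Dict.empty.insert 0 [[]],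
   PySem.Dict.empty.insert [] (PySem.Set.ofList [0]),
   PySem.Dict.empty.insert [] 0)

def pvAStep (ss : List Int) (n : Int) (st : pvATriple) (m : Int) : pvATriple :=
  let inner := (st.1.getD (m - 1) []).foldl (fun acc seq =>
      ss.foldl (fun acc s =>
        if PySem.Set.contains (st.2.1.getD seq []) (PySem.Int.mod (st.2.2.getD seq 0 + s) n) then acc
        else
          (acc.1 ++ [seq ++ [s]],
           acc.2.1.insert (seq ++ [s])
             (PySem.Set.union (st.2.1.getD seq [])
               (PySem.Set.ofList [PySem.Int.mod (st.2.2.getD seq 0 + s) n])),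
           acc.2.2.insert (seq ++ [s]) (PySem.Int.mod (st.2.2.getD seq 0 + s) n))) acc)
    (([] : List (List Int)),
     (PySem.Dict.empty : PySem.Dict (List Int) (PySem.Set Int)),
     (PySem.Dict.empty : PySem.Dict (List Int) Int))
  (st.1.insert m inner.1, st.2.1.update inner.2.1.items, st.2.2.update inner.2.2.items)


def pvAInv (ss : List Int) (n : Int) (j : Nat) (st : pvATriple) : Prop :=
  st.1.items = (List.range (j+1)).map (fun (i : Nat) => ((i : Int), pvLevSeqs ss n i))
  ∧ ∀ q ∈ pvLev ss n j, st.2.1.getD q.1 [] = q.2.1 ∧ st.2.2.getD q.1 0 = q.2.2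

lemma pvDictUpd {ν : Type} (K : List pvSt) (π : pvSt → ν) (f : List Int → ν)
    (hf : ∀ c ∈ K, π c = f c.1) (d : PySem.Dict (List Int) ν) (dflt : ν) (x : List Int)
    (hx : x ∈ K.map (·.1)) :
    (d.update (K.foldl (fun d c => d.insert c.1 (π c)) PySem.Dict.empty).items).getD x dflt
      = f x := by
  have hfold : K.foldl (fun d c => d.insert c.1 (π c)) PySem.Dict.empty
      = (K.map (fun c => (c.1, π c))).foldl (fun d p => d.insert p.1 p.2) PySem.Dict.empty := by
    rw [List.foldl_map]
  have hitems : ∀ p ∈ (K.foldl (fun d c => d.insert c.1 (π c)) PySem.Dict.empty).items,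
      p.2 = f p.1 := by
    rw [hfold]
    refine pvItems_foldl_insert f _ _ ?_ ?_
    · intro p hp
      simp only [List.mem_map] at hp
      obtain ⟨c, hc, rfl⟩ := hp
      exact hf c hc
    · intro p hp; simp [PySem.Dict.empty] at hp
  have hkeys : x ∈ (K.foldl (fun d c => d.insert c.1 (π c)) PySem.Dict.empty).items.map (·.1) := by
    have : (K.foldl (fun d c => d.insert c.1 (π c)) PySem.Dict.empty).items.map (·.1)
        = (K.foldl (fun d c => d.insert c.1 (π c)) PySem.Dict.empty).keys := rfl
    rw [this]
    rw [PySem.Dict.keys_foldl_insert_key (key := fun (c : pvSt) => c.1) (f := fun d c => π c)]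
    have hke : (PySem.Dict.empty : PySem.Dict (List Int) ν).keys = [] := rfl
    rw [hke, PySem.Set.update_nil_left, PySem.Set.mem_ofList]
    exact hx
  show ((K.foldl (fun d c => d.insert c.1 (π c)) PySem.Dict.empty).items.foldl
      (fun d p => d.insert p.1 p.2) d).getD x dflt = f x
  rw [pvGetD_foldl_insert f _ d x dflt hitems]
  rw [if_pos hkeys]

lemma pvAStep_inv (ss : List Int) (n : Int) (j : Nat) (st : pvATriple) (h : pvAInv ss n j st) :
    pvAInv ss n (j+1) (pvAStep ss n st ((j : Int) + 1)) := by
  obtain ⟨h1, h2⟩ := h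
  have hkeys : st.1.keys = (List.range (j+1)).map (fun (i : Nat) => (i : Int)) := by
    show st.1.items.map (·.1) = _
    rw [h1, List.map_map]
    rfl
  have hnodup : st.1.keys.Nodup := by
    rw [hkeys]
    exact (List.nodup_range).map (fun a b => by omega)
  have hprev : st.1.getD ((j : Int) + 1 - 1) [] = pvLevSeqs ss n j := by
    have hj : ((j : Int) + 1 - 1) = (j : Int) := by omega
    rw [hj]
    refine PySem.Dict.getD_of_mem_items st.1 ?_ hnodup []
    rw [h1, List.mem_map]
    exact ⟨j, by simp⟩
  have hK : (pvLev ss n j).flatMap (pvKids ss n) = pvLev ss n (j+1) :=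
    (pvDesc_succ_outer ss n j pvSt0).symm
  have hshape : ∀ c ∈ pvLev ss n (j+1), c.2 = pvStateOf n c.1 := pvLev_shape ss n (j+1)
  unfold pvAStep
  rw [hprev]
  rw [show pvLevSeqs ss n j = (pvLev ss n j).map (·.1) from rfl]
  rw [pvAInner ss n (pvLev ss n j) st.2.1 st.2.2 h2]
  rw [hK]
  dsimp only
  constructor
  · have hnc : st.1.contains ((j : Int) + 1) = false := by
      rw [← Bool.not_eq_true]
      intro hc
      rw [PySem.Dict.contains_iff_mem_keys, hkeys, List.mem_map] at hc
      obtain ⟨i, hi, hie⟩ := hc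
      rw [List.mem_range] at hi
      omega
    rw [PySem.Dict.items_insert_of_not_contains _ _ hnc, h1]
    rw [List.range_succ (n := j+1), List.map_append]
    simp only [List.map_cons, List.map_nil, List.nil_append]
    congr 1
  · intro q hq
    constructor
    · exact pvDictUpd (pvLev ss n (j+1)) (fun c => c.2.1) (fun seq => (pvStateOf n seq).1)
        (fun c hc => congrArg Prod.fst (hshape c hc)) st.2.1 [] q.1 (List.mem_map_of_mem hq)
        |>.trans (congrArg Prod.fst (hshape q hq)).symm
    · exact pvDictUpd (pvLev ss n (j+1)) (fun c => c.2.2) (fun seq => (pvStateOf n seq).2)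
        (fun c hc => congrArg Prod.snd (hshape c hc)) st.2.2 0 q.1 (List.mem_map_of_mem hq)
        |>.trans (congrArg Prod.snd (hshape q hq)).symm

lemma pvAMain (ss : List Int) (n : Int) :
    ∀ j : Nat, pvAInv ss n j
      (((PySem.List.pyRange 1 ((j : Int) + 1)).foldl (pvAStep ss n) pvAInit)) := by
  intro j
  induction j with
  | zero =>
      have h0 : PySem.List.pyRange 1 (((0 : Nat) : Int) + 1) = [] := by decide
      rw [h0]
      refine ⟨?_, ?_⟩
      · show (pvAInit.1).items = _
        simp [pvAInit, pvLevSeqs, pvLev, pvDesc, pvSt0, List.range_succ]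
        rfl
      intro q hq
      have hq' : q = pvSt0 := by
        simpa [pvLev, pvDesc] using hq
      subst hq'
      exact ⟨rfl, rfl⟩
  | succ j ih =>
      have hr : PySem.List.pyRange 1 ((((j : Nat) + 1 : Nat) : Int) + 1)
          = PySem.List.pyRange 1 ((j : Int) + 1) ++ [(j : Int) + 1] := by
        have h2 : ((((j : Nat) + 1 : Nat) : Int) + 1) = ((j : Int) + 1) + 1 := by push_cast; ring
        rw [h2]
        exact PySem.List.pyRange_one_succ_right (by omega)
      rw [hr, List.foldl_append, List.foldl_cons, List.foldl_nil]
      have := pvAStep_inv ss n j _ ih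
      exact this

lemma pvAResult (S : List Int) (n : Int) (max_deg : Int) (h : 0 ≤ max_deg) :
    enumerate_diff_seqs S n max_deg
      = (List.range (max_deg.toNat + 1)).map
          (fun (i : Nat) => ((i : Int), pvLevSeqs (PySem.List.sorted S (fun x => x) false) n i)) := by
  have hb : enumerate_diff_seqs S n max_deg
      = (((PySem.List.pyRange 1 (max_deg + 1)).foldl
          (pvAStep (PySem.List.sorted S (fun x => x) false) n) pvAInit).1).items := rfl
  rw [hb]
  have hc : max_deg + 1 = ((max_deg.toNat : Int) + 1) := by omega
  rw [hc]
  exact (pvAMain _ n max_deg.toNat).1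

lemma pvAResultNeg (S : List Int) (n : Int) (max_deg : Int) (h : max_deg < 0) :
    enumerate_diff_seqs S n max_deg = [(0, [[]])] := by
  have hb : enumerate_diff_seqs S n max_deg
      = (((PySem.List.pyRange 1 (max_deg + 1)).foldl
          (pvAStep (PySem.List.sorted S (fun x => x) false) n) pvAInit).1).items := rfl
  rw [hb]
  have hr : PySem.List.pyRange 1 (max_deg + 1) = [] := by
    rw [List.eq_nil_iff_forall_not_mem]
    intro x hx
    rw [PySem.List.mem_pyRange_one] at hx
    omega
  rw [hr]
  rfl

lemma pvExtend_getD (Ss : List Int) (n : Int) :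
    ∀ (fuel : Nat) (seq : List Int) (used : PySem.Set Int) (last depth : Int)
      (res : PySem.Dict Int (List (List Int))) (k : Int),
    (pvExtend Ss n seq used last depth fuel res).getD k []
      = res.getD k []
        ++ (if depth + 1 ≤ k ∧ k ≤ depth + fuel
            then (pvDesc Ss n (k - depth).toNat (seq, used, last)).map (·.1) else []) := by
  intro fuel
  induction fuel with
  | zero =>
      intro seq used last depth res k
      rw [pvExtend]
      rw [if_neg (by push_cast; omega)]
      simp
  | succ f ihf =>
      intro seq used last depth res k
      have aux : ∀ (ss : List Int) (res : PySem.Dict Int (List (List Int))),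
          (ss.foldl (fun result s =>
            if PySem.Set.contains used (PySem.Int.mod (last + s) n) then result
            else
              pvExtend Ss n (seq ++ [s])
                (PySem.Set.union used (PySem.Set.ofList [PySem.Int.mod (last + s) n]))
                (PySem.Int.mod (last + s) n) (depth + 1) f
                (result.modify (depth + 1) [] (· ++ [seq ++ [s]]))) res).getD k []
          = res.getD k []
            ++ (pvKids ss n (seq, used, last)).flatMap (fun c =>
                (if k = depth + 1 then [c.1] else [])
                ++ (if depth + 1 + 1 ≤ k ∧ k ≤ depth + 1 + f
                    then (pvDesc Ss n (k - (depth + 1)).toNat c).map (·.1) else [])) := by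
        intro ss
        induction ss with
        | nil => intro res; simp [pvKids]
        | cons s ss ih =>
            intro res
            rw [List.foldl_cons]
            by_cases hc : PySem.Set.contains used (PySem.Int.mod (last + s) n) = true
            · rw [if_pos hc, ih]
              have hk : pvKids (s :: ss) n (seq, used, last) = pvKids ss n (seq, used, last) := by
                simp only [pvKids, List.flatMap_cons]
                rw [if_pos hc]
                simp
              rw [hk]
            · rw [if_neg hc, ih, ihf]
              rw [PySem.Dict.getD_modify]
              have hk : pvKids (s :: ss) n (seq, used, last)
                  = (seq ++ [s],
                     PySem.Set.union used (PySem.Set.ofList [PySem.Int.mod (last + s) n]),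
                     PySem.Int.mod (last + s) n) :: pvKids ss n (seq, used, last) := by
                simp only [pvKids, List.flatMap_cons]
                rw [if_neg hc]
                simp
              rw [hk, List.flatMap_cons]
              by_cases hkd : k = depth + 1
              · subst hkd
                rw [if_pos rfl, if_pos rfl]
                rw [if_neg (by omega)]
                simp [List.append_assoc]
              · rw [if_neg hkd, if_neg hkd]
                simp [List.append_assoc]
      rw [pvExtend, aux Ss res]
      by_cases h1 : k = depth + 1
      · rw [if_pos (by omega)]
        have ht : (k - depth).toNat = 1 := by omega
        rw [ht]
        congr 1
        rw [show pvDesc Ss n 1 (seq, used, last)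
            = (pvKids Ss n (seq, used, last)).flatMap (fun c => [c]) from rfl]
        rw [List.flatMap_singleton']
        rw [List.flatMap_congr (g := fun c => [c.1]) (fun c _ => by rw [if_pos h1, if_neg (by omega)]; simp)]
        rw [← List.map_eq_flatMap]
      · by_cases h2 : depth + 1 + 1 ≤ k ∧ k ≤ depth + 1 + f
        · rw [if_pos (by omega)]
          congr 1
          have ht : (k - depth).toNat = (k - (depth + 1)).toNat + 1 := by omega
          rw [ht]
          rw [show pvDesc Ss n ((k - (depth + 1)).toNat + 1) (seq, used, last)
              = (pvKids Ss n (seq, used, last)).flatMap (pvDesc Ss n (k - (depth + 1)).toNat) from rfl]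
          rw [List.map_flatMap]
          exact (List.flatMap_congr (fun c _ => by rw [if_neg h1, if_pos h2]; simp)).symm
        · rw [if_neg (by omega)]
          rw [List.flatMap_congr (g := fun c => ([] : List (List Int)))
            (fun c _ => by rw [if_neg h1, if_neg h2]; simp)]
          simp

lemma pvExtend_keys (Ss : List Int) (n : Int) :
    ∀ (fuel : Nat) (seq : List Int) (used : PySem.Set Int) (last depth : Int)
      (res : PySem.Dict Int (List (List Int))),
    (∀ j : Int, depth + 1 ≤ j → j ≤ depth + fuel → res.contains j = true) →
    (pvExtend Ss n seq used last depth fuel res).keys = res.keys := by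
  intro fuel
  induction fuel with
  | zero => intro seq used last depth res _; rfl
  | succ f ihf =>
      intro seq used last depth res hres
      rw [pvExtend]
      have aux : ∀ (ss : List Int) (res : PySem.Dict Int (List (List Int))),
          (∀ j : Int, depth + 1 ≤ j → j ≤ depth + (f + 1 : Nat) → res.contains j = true) →
          (ss.foldl (fun result s =>
            if PySem.Set.contains used (PySem.Int.mod (last + s) n) then result
            else
              pvExtend Ss n (seq ++ [s])
                (PySem.Set.union used (PySem.Set.ofList [PySem.Int.mod (last + s) n]))
                (PySem.Int.mod (last + s) n) (depth + 1) f
                (result.modify (depth + 1) [] (· ++ [seq ++ [s]]))) res).keys = res.keys := by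
        intro ss
        induction ss with
        | nil => intro res _; rfl
        | cons s ss ih =>
            intro res hres
            rw [List.foldl_cons]
            by_cases hc : PySem.Set.contains used (PySem.Int.mod (last + s) n) = true
            · rw [if_pos hc]
              exact ih res hres
            · rw [if_neg hc]
              have hcontains : res.contains (depth + 1) = true :=
                hres (depth + 1) (by omega) (by push_cast; omega)
              have hkm : (res.modify (depth + 1) [] (· ++ [seq ++ [s]])).keys = res.keys := by
                rw [PySem.Dict.keys_modify]
                exact PySem.Dict.keys_insert_of_contains _ _ hcontains
              have hkr : (pvExtend Ss n (seq ++ [s])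
                  (PySem.Set.union used (PySem.Set.ofList [PySem.Int.mod (last + s) n]))
                  (PySem.Int.mod (last + s) n) (depth + 1) f
                  (res.modify (depth + 1) [] (· ++ [seq ++ [s]]))).keys = res.keys := by
                rw [ihf _ _ _ _ _ ?_]
                · exact hkm
                · intro j hj1 hj2
                  rw [PySem.Dict.contains_modify]
                  rw [hres j (by omega) (by push_cast at hj2 ⊢; omega)]
                  simp
              rw [ih _ ?_]
              · exact hkr
              · intro j hj1 hj2
                have : (pvExtend Ss n (seq ++ [s])
                    (PySem.Set.union used (PySem.Set.ofList [PySem.Int.mod (last + s) n]))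
                    (PySem.Int.mod (last + s) n) (depth + 1) f
                    (res.modify (depth + 1) [] (· ++ [seq ++ [s]]))).contains j
                    = res.contains j := by
                  rw [PySem.Dict.contains_eq_decide_mem_keys, PySem.Dict.contains_eq_decide_mem_keys, hkr]
                rw [this]
                exact hres j hj1 hj2
      exact aux Ss res hres

lemma pvBInitItems (max_deg : Int) (h : 0 ≤ max_deg) :
    ((((PySem.List.pyRange 0 (max_deg + 1)).foldl (fun d m => d.insert m [])
        (PySem.Dict.empty : PySem.Dict Int (List (List Int)))).insert 0 [[]])).items
      = (List.range (max_deg.toNat + 1)).map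
          (fun (i : Nat) => ((i : Int), if i = 0 then [[]] else ([] : List (List Int)))) := by
  have hr : PySem.List.pyRange 0 (max_deg + 1)
      = (List.range (max_deg.toNat + 1)).map (fun (k : Nat) => (k : Int)) := by
    have : max_deg + 1 = ((max_deg.toNat + 1 : Nat) : Int) := by omega
    rw [this, PySem.List.pyRange_zero_natCast]
  have hnodup : ((List.range (max_deg.toNat + 1)).map (fun (k : Nat) => (k : Int))).Nodup :=
    (List.nodup_range).map (fun a b => by omega)
  have h0 : ((PySem.List.pyRange 0 (max_deg + 1)).foldl (fun d m => d.insert m [])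
      (PySem.Dict.empty : PySem.Dict Int (List (List Int)))).items
      = (List.range (max_deg.toNat + 1)).map (fun (k : Nat) => ((k : Int), ([] : List (List Int)))) := by
    rw [hr]
    have := PySem.Dict.items_foldl_insert_fresh
      ((List.range (max_deg.toNat + 1)).map (fun (k : Nat) => (k : Int)))
      (fun m => m) (fun _ => ([] : List (List Int)))
      (PySem.Dict.empty : PySem.Dict Int (List (List Int)))
      (fun a _ => rfl) (by simpa using hnodup)
    simpa [List.map_map] using this
  have hc : ((PySem.List.pyRange 0 (max_deg + 1)).foldl (fun d m => d.insert m [])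
      (PySem.Dict.empty : PySem.Dict Int (List (List Int)))).contains 0 = true := by
    rw [PySem.Dict.contains_eq_decide_mem_keys]
    have hk : ∀ (d : PySem.Dict Int (List (List Int))), d.keys = d.items.map (fun p => p.1) :=
      fun _ => rfl
    rw [hk, h0, List.map_map]
    simp
  rw [PySem.Dict.items_insert_of_contains _ _ hc, h0, List.map_map]
  refine List.map_congr_left ?_
  intro i hi
  by_cases h0' : i = 0
  · subst h0'; simp
  · have : ¬ (((i : Nat) : Int) == (0 : Int)) = true := by
      simp
      omega
    simp only [Function.comp_apply]
    rw [if_neg this, if_neg h0']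

lemma pvBResult (S : List Int) (n : Int) (max_deg : Int) (h : 0 ≤ max_deg) :
    enumerate_diff_seqs_alt S n max_deg
      = (List.range (max_deg.toNat + 1)).map
          (fun (i : Nat) => ((i : Int), pvLevSeqs (PySem.List.sorted S (fun x => x) false) n i)) := by
  set ss := PySem.List.sorted S (fun x => x) false with hss
  set init := (((PySem.List.pyRange 0 (max_deg + 1)).foldl (fun d m => d.insert m [])
      (PySem.Dict.empty : PySem.Dict Int (List (List Int)))).insert 0 [[]]) with hinit
  have hb : enumerate_diff_seqs_alt S n max_deg
      = (pvExtend ss n [] (PySem.Set.ofList [0]) 0 0 max_deg.toNat init).items := rfl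
  have hitems := pvBInitItems max_deg h
  rw [← hinit] at hitems
  have hkeys : init.keys = (List.range (max_deg.toNat + 1)).map (fun (k : Nat) => (k : Int)) := by
    have : init.keys = init.items.map (fun p => p.1) := rfl
    rw [this, hitems, List.map_map]
    rfl
  have hnodup : init.keys.Nodup := by
    rw [hkeys]
    exact (List.nodup_range).map (fun a b => by omega)
  have hcont : ∀ j : Int, (0 : Int) + 1 ≤ j → j ≤ 0 + (max_deg.toNat : Int) →
      init.contains j = true := by
    intro j h1 h2
    rw [PySem.Dict.contains_eq_decide_mem_keys, hkeys]
    simp only [decide_eq_true_eq, List.mem_map]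
    exact ⟨j.toNat, by rw [List.mem_range]; omega, by omega⟩
  have hK : (pvExtend ss n [] (PySem.Set.ofList [0]) 0 0 max_deg.toNat init).keys = init.keys :=
    pvExtend_keys ss n max_deg.toNat [] (PySem.Set.ofList [0]) 0 0 init hcont
  have hKnodup : (pvExtend ss n [] (PySem.Set.ofList [0]) 0 0 max_deg.toNat init).keys.Nodup := by
    rw [hK]; exact hnodup
  rw [hb, PySem.Dict.items_eq_map_keys _ hKnodup [], hK, hkeys, List.map_map]
  refine List.map_congr_left ?_
  intro i hi
  rw [List.mem_range] at hi
  simp only [Function.comp_apply]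
  congr 1
  rw [pvExtend_getD]
  have hgetD : init.getD ((i : Nat) : Int) [] = if i = 0 then [[]] else [] := by
    refine PySem.Dict.getD_of_mem_items init ?_ hnodup []
    rw [hitems]
    exact List.mem_map.2 ⟨i, by rw [List.mem_range]; omega, rfl⟩
  rw [hgetD]
  by_cases h0' : i = 0
  · subst h0'
    rw [if_pos rfl, if_neg (by norm_num)]
    show [[]] ++ [] = pvLevSeqs ss n 0
    rfl
  · rw [if_neg h0', if_pos (by push_cast; omega)]
    show [] ++ _ = _
    rw [List.nil_append]
    have : (((i : Nat) : Int) - 0).toNat = i := by omega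
    rw [this]
    rfl

lemma pvBResultNeg (S : List Int) (n : Int) (max_deg : Int) (h : max_deg < 0) :
    enumerate_diff_seqs_alt S n max_deg = [(0, [[]])] := by
  have hr : PySem.List.pyRange 0 (max_deg + 1) = [] := by
    rw [List.eq_nil_iff_forall_not_mem]
    intro x hx
    rw [PySem.List.mem_pyRange_one] at hx
    omega
  have hf : max_deg.toNat = 0 := by omega
  show (pvExtend _ n [] (PySem.Set.ofList [0]) 0 0 max_deg.toNat
      (((PySem.List.pyRange 0 (max_deg + 1)).foldl (fun d m => d.insert m [])
        PySem.Dict.empty).insert 0 [[]])).items = [(0, [[]])]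
  rw [hr, hf]
  rfl

theorem enumerate_diff_seqs_spec : Claim_equal_enumerate_diff_seqs := by
  unfold Claim_equal_enumerate_diff_seqs
  intro S n max_deg _ _
  unfold Spec_enumerate_diff_seqs
  by_cases h : 0 ≤ max_deg
  · rw [pvAResult S n max_deg h, pvBResult S n max_deg h]
  · rw [pvAResultNeg S n max_deg (by omega), pvBResultNeg S n max_deg (by omega)]
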